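-- pv_equiv track=rewrite | github.com/AlexeySorokin/pyparadigm | scripts/graph_utilities.py | _backtrace_longest_paths
-- ===== SOURCE A (Python) =====
-- def _backtrace_longest_paths(finals, source, length, predecessors):
--     """
--     Восстанавливает самые длинные пути с помощью обратных ссылок
--     """
--     longest_paths_stack = []
--     answer = []
--     for vertex in finals:
--         longest_paths_stack.append((vertex, length, [vertex]))
--     for curr_vertex, curr_length, curr_path in longest_paths_stack:
--         if curr_length == 0:
--             if curr_vertex == source:
--                 answer.append(curr_path[::-1])
--         else:
--             for next_vertex in predecessors[curr_vertex]:
--                 longest_paths_stack.append((next_vertex, curr_length - 1,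
--                                             curr_path + [next_vertex]))
--     return answer
-- ===== SOURCE B (Python) =====
-- def _backtrace_longest_paths(finals, source, length, predecessors):
--     paths = [[vertex] for vertex in finals]
--     for _ in range(length):
--         paths = [path + [next_vertex]
--                  for path in paths
--                  for next_vertex in predecessors[path[-1]]]
--     return [path[::-1] for path in paths if path[-1] == source]
-- ===== Notes on version B (the rewrite author's own statement) =====
-- stated objective: simpler
-- what changed: Replaces A's single self-extending worklist of (vertex, remaining-length, path) triples, which emits answers mid-scan once the counter hits zero, with `length` rounds of a level-synchronized flat-map over bare paths (the current vertex is just path[-1]) and one final filter for the source.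
-- outside the precondition, e.g. on _backtrace_longest_paths([1], 3, 2, {1: [2], 2: [3]}): A returns [[3, 2, 1]], B returns [[3, 2, 1]]; on _backtrace_longest_paths([1], 1, -1, {1: []}): A returns [], B returns [[1]]
import Mathlib
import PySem

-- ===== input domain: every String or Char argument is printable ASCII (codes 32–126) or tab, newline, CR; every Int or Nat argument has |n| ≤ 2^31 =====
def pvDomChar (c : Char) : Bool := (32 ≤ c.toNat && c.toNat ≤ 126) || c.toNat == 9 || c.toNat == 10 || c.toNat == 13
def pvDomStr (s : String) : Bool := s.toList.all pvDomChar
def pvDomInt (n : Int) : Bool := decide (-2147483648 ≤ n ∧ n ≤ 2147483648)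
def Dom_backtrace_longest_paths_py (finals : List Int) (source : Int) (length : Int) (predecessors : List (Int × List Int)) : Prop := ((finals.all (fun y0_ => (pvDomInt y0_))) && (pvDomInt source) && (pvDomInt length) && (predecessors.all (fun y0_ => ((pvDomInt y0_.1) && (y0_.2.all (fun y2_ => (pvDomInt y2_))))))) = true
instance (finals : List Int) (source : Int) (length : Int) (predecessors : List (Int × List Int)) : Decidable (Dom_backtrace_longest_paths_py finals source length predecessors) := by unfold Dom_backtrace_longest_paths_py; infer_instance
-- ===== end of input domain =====

-- B replaces A's self-extending worklist of (vertex, remaining-length, path) triples, which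
-- emits answers in mid-scan, by `length` rounds of a level-synchronized flat-map over bare
-- paths (the current vertex is path[-1]) with a single filter at the end (objective: simpler).

-- ===== PORT A =====
-- one step of expansion over (vertex, path) pairs; used ONLY to compute the exact fuel bound below
def pvStepPairs (predecessors : List (Int × List Int)) (items : List (Int × List Int)) : List (Int × List Int) :=
  items.flatMap (fun x => ((PySem.Dict.mk predecessors).getD x.1 []).map (fun nxt => (nxt, x.2 ++ [nxt])))

-- exact number of worklist iterations A performs for a depth-d batch of (vertex, path) items
def pvCountA (predecessors : List (Int × List Int)) : Nat → List (Int × List Int) → Nat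
  | 0, items => items.length
  | d + 1, items => items.length + pvCountA predecessors d (pvStepPairs predecessors items)

-- A's `for … in longest_paths_stack` loop over the self-extending worklist; `fuel` is only a
-- termination guard (the port passes the exact iteration count, so for 0 ≤ length it never runs out)
def pvGoA (source : Int) (predecessors : List (Int × List Int)) :
    Nat → List (Int × Int × List Int) → List (List Int) → List (List Int)
  | _, [], answer => answer
  | 0, _ :: _, answer => answer   -- fuel exhausted: unreachable under Pre_
  | fuel + 1, (curr_vertex, curr_length, curr_path) :: rest, answer =>
      if curr_length == 0 then
        pvGoA source predecessors fuel rest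
          (if curr_vertex == source
           then answer ++ [(PySem.List.slice? curr_path none none (-1)).getD []]  -- curr_path[::-1]
           else answer)
      else
        -- KeyError on a missing key is excluded by Pre_; the [] default is then unreachable
        pvGoA source predecessors fuel
          (rest ++ ((PySem.Dict.mk predecessors).getD curr_vertex []).map
                     (fun next_vertex => (next_vertex, curr_length - 1, curr_path ++ [next_vertex])))
          answer

def backtrace_longest_paths_py (finals : List Int) (source : Int) (length : Int) (predecessors : List (Int × List Int)) : List (List Int) :=
  pvGoA source predecessors
    (pvCountA predecessors length.toNat (finals.map (fun vertex => (vertex, [vertex]))) + 1)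
    (finals.map (fun vertex => (vertex, length, ([vertex] : List Int)))) []

-- ===== PORT B =====
-- paths are nonempty by construction (each starts as [v] and only grows), so Python's
-- path[-1] never raises; the pyGetD default 0 and the slice? default [] are unreachable
def backtrace_longest_paths_py_alt (finals : List Int) (source : Int) (length : Int) (predecessors : List (Int × List Int)) : List (List Int) :=
  ((PySem.List.pyRange 0 length 1).foldl
      (fun paths _ => paths.flatMap (fun path =>
        ((PySem.Dict.mk predecessors).getD (PySem.List.pyGetD path (-1) 0) []).map
          (fun next_vertex => path ++ [next_vertex])))
      (finals.map (fun vertex => [vertex]))).filterMap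
    (fun path => if PySem.List.pyGetD path (-1) 0 == source
                 then some ((PySem.List.slice? path none none (-1)).getD [])   -- path[::-1]
                 else none)

-- ===== PRECONDITION & SPEC =====
-- Pre_ excludes negative lengths (outside the natural domain: A counts length down past zero and
-- diverges or returns []) and, for length > 1, inputs whose finals or listed predecessor vertices
-- are not all dict keys, on which A can raise KeyError; this key-closure condition is sufficient,
-- not exact, so a few key-incomplete inputs on which A still returns are also excluded (cited).
def Pre_backtrace_longest_paths_py (finals : List Int) (source : Int) (length : Int) (predecessors : List (Int × List Int)) : Prop :=
  0 ≤ length ∧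
    (length = 0 ∨
      ((∀ v ∈ finals, v ∈ predecessors.map Prod.fst) ∧
        (length = 1 ∨ ∀ kv ∈ predecessors, ∀ u ∈ kv.2, u ∈ predecessors.map Prod.fst)))
instance (finals : List Int) (source : Int) (length : Int) (predecessors : List (Int × List Int)) : Decidable (Pre_backtrace_longest_paths_py finals source length predecessors) := by unfold Pre_backtrace_longest_paths_py; infer_instance

def pvWitness_backtrace_longest_paths_py : List Int × Int × Int × (List (Int × List Int)) :=
  ([1], 2, 1, [(1, [2]), (2, [])])

def Spec_backtrace_longest_paths_py (finals : List Int) (source : Int) (length : Int) (predecessors : List (Int × List Int)) (out : List (List Int)) : Prop := out = backtrace_longest_paths_py_alt finals source length predecessors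
instance (finals : List Int) (source : Int) (length : Int) (predecessors : List (Int × List Int)) (out : List (List Int)) : Decidable (Spec_backtrace_longest_paths_py finals source length predecessors out) := by unfold Spec_backtrace_longest_paths_py; infer_instance

-- ===== CLAIM (what is proved, stated in full; the proofs are below) =====
def Claim_equal_backtrace_longest_paths_py : Prop := ∀ (finals : List Int) (source : Int) (length : Int) (predecessors : List (Int × List Int)), Dom_backtrace_longest_paths_py finals source length predecessors → Pre_backtrace_longest_paths_py finals source length predecessors → Spec_backtrace_longest_paths_py finals source length predecessors (backtrace_longest_paths_py finals source length predecessors)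

-- ===== LEMMAS AND PROOFS =====

theorem pvWitness_ok :
    Dom_backtrace_longest_paths_py (pvWitness_backtrace_longest_paths_py.1) (pvWitness_backtrace_longest_paths_py.2.1) (pvWitness_backtrace_longest_paths_py.2.2.1) (pvWitness_backtrace_longest_paths_py.2.2.2) ∧
    Pre_backtrace_longest_paths_py (pvWitness_backtrace_longest_paths_py.1) (pvWitness_backtrace_longest_paths_py.2.1) (pvWitness_backtrace_longest_paths_py.2.2.1) (pvWitness_backtrace_longest_paths_py.2.2.2) := by
  constructor <;> decide

-- n-fold application, used to phrase both sides' level iteration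
def pvNIter {α : Type} (f : α → α) : Nat → α → α
  | 0, x => x
  | n + 1, x => pvNIter f n (f x)

-- B's one level of expansion over bare paths (syntactically the body of B's foldl step)
def pvStepB (predecessors : List (Int × List Int)) (paths : List (List Int)) : List (List Int) :=
  paths.flatMap (fun path =>
    ((PySem.Dict.mk predecessors).getD (PySem.List.pyGetD path (-1) 0) []).map
      (fun next_vertex => path ++ [next_vertex]))

-- B's final filter (syntactically the filterMap of the port)
def pvFinishB (source : Int) (paths : List (List Int)) : List (List Int) :=
  paths.filterMap (fun path => if PySem.List.pyGetD path (-1) 0 == source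
                               then some ((PySem.List.slice? path none none (-1)).getD [])
                               else none)

def pvTag (d : Nat) (items : List (Int × List Int)) : List (Int × Int × List Int) :=
  items.map (fun x => (x.1, (d : Int), x.2))

def pvEmit (source : Int) (items : List (Int × List Int)) : List (List Int) :=
  items.filterMap (fun x => if x.1 == source
                            then some ((PySem.List.slice? x.2 none none (-1)).getD [])
                            else none)

def pvGood (x : Int × List Int) : Prop := ∃ l, x.2 = l ++ [x.1]

theorem pvGoA_nil (s : Int) (pr : List (Int × List Int)) (fuel : Nat) (ans : List (List Int)) :
    pvGoA s pr fuel [] ans = ans := by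
  cases fuel <;> rfl

theorem pvL0 (s : Int) (pr : List (Int × List Int)) :
    ∀ (items : List (Int × List Int)) (ans : List (List Int)) (fuel : Nat),
      items.length ≤ fuel → pvGoA s pr fuel (pvTag 0 items) ans = ans ++ pvEmit s items
  | [], ans, fuel, _ => by simp [pvTag, pvEmit, pvGoA_nil]
  | x :: rest, ans, fuel, h => by
      obtain ⟨f, rfl⟩ : ∃ f, fuel = f + 1 := by
        cases fuel with
        | zero => simp at h
        | succ f => exact ⟨f, rfl⟩
      have hrest : rest.length ≤ f := by simpa using h
      have hcons : pvTag 0 (x :: rest) = (x.1, ((0 : Nat) : Int), x.2) :: pvTag 0 rest := rfl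
      rw [hcons]
      simp only [pvGoA, Nat.cast_zero, beq_self_eq_true]
      rw [if_pos trivial, pvL0 s pr rest _ f hrest]
      by_cases hx : x.1 = s
      · simp [pvEmit, hx]
      · simp [pvEmit, hx]

theorem pvL1 (s : Int) (pr : List (Int × List Int)) (d : Nat) :
    ∀ (items acc : List (Int × List Int)) (ans : List (List Int)) (fuel : Nat),
      items.length ≤ fuel →
      pvGoA s pr fuel (pvTag (d + 1) items ++ pvTag d acc) ans =
        pvGoA s pr (fuel - items.length) (pvTag d (acc ++ pvStepPairs pr items)) ans
  | [], acc, ans, fuel, _ => by simp [pvTag, pvStepPairs]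
  | x :: rest, acc, ans, fuel, h => by
      obtain ⟨f, rfl⟩ : ∃ f, fuel = f + 1 := by
        cases fuel with
        | zero => simp at h
        | succ f => exact ⟨f, rfl⟩
      have hrest : rest.length ≤ f := by simpa using h
      have hne : (((d + 1 : Nat) : Int) == 0) = false := by
        rw [beq_eq_false_iff_ne]; push_cast; omega
      simp only [pvTag, List.map_cons, List.cons_append, pvGoA, hne, Bool.false_eq_true,
        if_false]
      have hexp :
          (((PySem.Dict.mk pr).getD x.1 []).map
              (fun nxt => (nxt, ((d + 1 : Nat) : Int) - 1, x.2 ++ [nxt]))) =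
            pvTag d (((PySem.Dict.mk pr).getD x.1 []).map (fun nxt => (nxt, x.2 ++ [nxt]))) := by
        simp [pvTag, List.map_map, Function.comp]
      rw [hexp]
      have hassoc :
          (rest.map (fun x => (x.1, ((d + 1 : Nat) : Int), x.2)) ++ acc.map (fun x => (x.1, (d : Int), x.2))) ++
              pvTag d (((PySem.Dict.mk pr).getD x.1 []).map (fun nxt => (nxt, x.2 ++ [nxt]))) =
            pvTag (d + 1) rest ++ pvTag d (acc ++ ((PySem.Dict.mk pr).getD x.1 []).map (fun nxt => (nxt, x.2 ++ [nxt]))) := by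
        simp [pvTag, List.append_assoc]
      rw [hassoc, pvL1 s pr d rest _ ans f hrest]
      have hstep : pvStepPairs pr (x :: rest) =
          ((PySem.Dict.mk pr).getD x.1 []).map (fun nxt => (nxt, x.2 ++ [nxt])) ++ pvStepPairs pr rest := by
        simp [pvStepPairs]
      rw [hstep]
      simp [pvTag, List.map_map, List.append_assoc, Function.comp_def]

theorem pvMainA (s : Int) (pr : List (Int × List Int)) :
    ∀ (d : Nat) (items : List (Int × List Int)) (ans : List (List Int)) (fuel : Nat),
      pvCountA pr d items ≤ fuel →
      pvGoA s pr fuel (pvTag d items) ans = ans ++ pvEmit s (pvNIter (pvStepPairs pr) d items)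
  | 0, items, ans, fuel, h => by
      simpa [pvNIter] using pvL0 s pr items ans fuel (by simpa [pvCountA] using h)
  | d + 1, items, ans, fuel, h => by
      have hlen : items.length ≤ fuel := by
        simp [pvCountA] at h; omega
      have h1 := pvL1 s pr d items [] ans fuel hlen
      simp only [pvTag, List.map_nil, List.append_nil, List.nil_append] at h1
      rw [show pvTag (d + 1) items = items.map (fun x => (x.1, ((d + 1 : Nat) : Int), x.2)) from rfl] at *
      rw [h1]
      have h2 : pvCountA pr d (pvStepPairs pr items) ≤ fuel - items.length := by
        simp [pvCountA] at h; omega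
      simpa [pvNIter] using pvMainA s pr d (pvStepPairs pr items) ans (fuel - items.length) h2

theorem pvStepPairs_good (pr : List (Int × List Int)) (items : List (Int × List Int)) :
    ∀ y ∈ pvStepPairs pr items, pvGood y := by
  intro y hy
  simp only [pvStepPairs, List.mem_flatMap, List.mem_map] at hy
  obtain ⟨x, _, nxt, _, rfl⟩ := hy
  exact ⟨x.2, rfl⟩

theorem pvStepPairs_snd (pr : List (Int × List Int)) :
    ∀ (items : List (Int × List Int)), (∀ x ∈ items, pvGood x) →
      (pvStepPairs pr items).map Prod.snd = pvStepB pr (items.map Prod.snd)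
  | [], _ => by simp [pvStepPairs, pvStepB]
  | x :: rest, hg => by
      obtain ⟨l, hl⟩ := hg x (List.mem_cons_self ..)
      have hlast : PySem.List.pyGetD x.2 (-1) 0 = x.1 := by
        rw [hl]; exact PySem.List.pyGetD_neg_one_append_singleton l x.1 0
      have hrest := pvStepPairs_snd pr rest (fun y hy => hg y (List.mem_cons_of_mem _ hy))
      simp only [pvStepPairs, pvStepB, List.flatMap_cons, List.map_append, List.map_map,
        List.map_cons, hlast] at *
      rw [hrest]
      rfl

theorem pvEmit_eq_finish (s : Int) :
    ∀ (items : List (Int × List Int)), (∀ x ∈ items, pvGood x) →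
      pvEmit s items = pvFinishB s (items.map Prod.snd)
  | [], _ => by simp [pvEmit, pvFinishB]
  | x :: rest, hg => by
      obtain ⟨l, hl⟩ := hg x (List.mem_cons_self ..)
      have hlast : PySem.List.pyGetD x.2 (-1) 0 = x.1 := by
        rw [hl]; exact PySem.List.pyGetD_neg_one_append_singleton l x.1 0
      have hrest := pvEmit_eq_finish s rest (fun y hy => hg y (List.mem_cons_of_mem _ hy))
      simp only [pvEmit, pvFinishB, List.map_cons, List.filterMap_cons, hlast] at *
      rw [hrest]

theorem pvBridge (s : Int) (pr : List (Int × List Int)) :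
    ∀ (d : Nat) (items : List (Int × List Int)), (∀ x ∈ items, pvGood x) →
      pvEmit s (pvNIter (pvStepPairs pr) d items) =
        pvFinishB s (pvNIter (pvStepB pr) d (items.map Prod.snd))
  | 0, items, hg => by simpa [pvNIter] using pvEmit_eq_finish s items hg
  | d + 1, items, hg => by
      simp only [pvNIter]
      rw [pvBridge s pr d (pvStepPairs pr items) (pvStepPairs_good pr items),
        pvStepPairs_snd pr items hg]

theorem pvFoldl_ignore {α β : Type} (f : α → α) :
    ∀ (l : List β) (x : α), l.foldl (fun a _ => f a) x = pvNIter f l.length x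
  | [], x => rfl
  | _ :: rest, x => by simp [pvNIter, pvFoldl_ignore f rest (f x)]

-- ===== VERDICT (by name: the statement is the Claim_ definition above) =====
theorem backtrace_longest_paths_py_spec : Claim_equal_backtrace_longest_paths_py := by
  intro finals source length predecessors _ hpre
  unfold Spec_backtrace_longest_paths_py
  obtain ⟨hlen, -⟩ := hpre
  have htag : finals.map (fun vertex => (vertex, length, ([vertex] : List Int))) =
      pvTag length.toNat (finals.map (fun vertex => (vertex, [vertex]))) := by
    simp [pvTag, List.map_map, Function.comp, Int.toNat_of_nonneg hlen]
  have hA : backtrace_longest_paths_py finals source length predecessors =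
      pvEmit source (pvNIter (pvStepPairs predecessors) length.toNat
        (finals.map (fun vertex => (vertex, [vertex])))) := by
    rw [backtrace_longest_paths_py, htag,
      pvMainA source predecessors length.toNat _ [] _ (Nat.le_succ _)]
    simp
  have hgood : ∀ x ∈ finals.map (fun vertex => ((vertex : Int), [vertex])), pvGood x := by
    intro x hx
    simp only [List.mem_map] at hx
    obtain ⟨v, _, rfl⟩ := hx
    exact ⟨[], rfl⟩
  have hB : backtrace_longest_paths_py_alt finals source length predecessors =
      pvFinishB source (pvNIter (pvStepB predecessors) length.toNat
        ((finals.map (fun vertex => ((vertex : Int), [vertex]))).map Prod.snd)) := by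
    rw [backtrace_longest_paths_py_alt]
    rw [show ((PySem.List.pyRange 0 length 1).foldl
        (fun paths _ => paths.flatMap (fun path =>
          ((PySem.Dict.mk predecessors).getD (PySem.List.pyGetD path (-1) 0) []).map
            (fun next_vertex => path ++ [next_vertex])))
        (finals.map (fun vertex => [vertex]))) =
        (PySem.List.pyRange 0 length 1).foldl (fun a _ => pvStepB predecessors a)
          (finals.map (fun vertex => [vertex])) from rfl]
    rw [pvFoldl_ignore]
    have hr : (PySem.List.pyRange 0 length 1).length = length.toNat := by
      simp [PySem.List.length_pyRange_one]
    rw [hr]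
    simp [pvFinishB, List.map_map, Function.comp_def]
  rw [hA, hB, pvBridge source predecessors length.toNat _ hgood]
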